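-- pv_equiv track=rewrite | github.com/astellj/advent-of-code | 2023/03/failed.py | sum_numeric_values
-- ===== SOURCE A (Python) =====
-- def sum_numeric_values(input_text):
--     total_sum = 0
--     current_number = ""
--
--     for char in input_text:
--         if char.isdigit():
--             current_number += char
--         elif current_number:
--             total_sum += int(current_number)
--             current_number = ""
--
--     # Check for any remaining number at the end of the input
--     if current_number:
--         total_sum += int(current_number)
--
--     return total_sum
-- ===== SOURCE B (Python) =====
-- from itertools import groupby
--
-- def sum_numeric_values(input_text):
--     return sum(int(''.join(g))
--                for is_digit, g in groupby(input_text, key=str.isdigit)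
--                if is_digit)
-- ===== Notes on version B (the rewrite author's own statement) =====
-- stated objective: idiomatic
-- what changed: Replaces the manual current_number accumulator with its trailing-flush branch by itertools.groupby over str.isdigit, summing int() of each maximal digit run.
import Mathlib
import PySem

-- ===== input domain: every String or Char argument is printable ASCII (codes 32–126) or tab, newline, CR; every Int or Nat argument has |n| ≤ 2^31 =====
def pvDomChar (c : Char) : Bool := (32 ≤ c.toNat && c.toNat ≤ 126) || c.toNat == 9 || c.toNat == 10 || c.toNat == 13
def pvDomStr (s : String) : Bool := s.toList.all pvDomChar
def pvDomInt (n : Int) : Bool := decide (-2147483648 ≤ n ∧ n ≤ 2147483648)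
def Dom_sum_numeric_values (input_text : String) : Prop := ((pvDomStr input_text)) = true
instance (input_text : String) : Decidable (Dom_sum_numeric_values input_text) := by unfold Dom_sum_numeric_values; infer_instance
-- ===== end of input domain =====

-- B replaces A's manual accumulator-and-flush loop by grouping maximal digit runs (itertools.groupby); same O(n) cost, more idiomatic.

-- ===== PORT A =====
-- int(current_number): ofChars? is some on every nonempty digit run, so the .getD 0
-- default is unreachable (current_number is nonempty and all-digit whenever flushed).
def pvAInt (cur : List Char) : Int := (PySem.Int.ofChars? cur).getD 0

-- the for-loop with state (total_sum, current_number), then the trailing flush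
def pvALoop : List Char → Int → List Char → Int
  | [], total, cur => if cur ≠ [] then total + pvAInt cur else total
  | c :: cs, total, cur =>
      if PySem.Chars.isdigit c then pvALoop cs total (cur ++ [c])
      else if cur ≠ [] then pvALoop cs (total + pvAInt cur) []
      else pvALoop cs total cur

def sum_numeric_values (input_text : String) : Int :=
  pvALoop input_text.toList 0 []

-- ===== PORT B =====
-- groupby(input_text, key=str.isdigit): each True group is the maximal digit run at the
-- current position (takeWhile/dropWhile); int(''.join(g)) is ofChars? of the run.
def pvBGo : List Char → Int
  | [] => 0
  | c :: cs =>
      if PySem.Chars.isdigit c then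
        (PySem.Int.ofChars? (c :: cs.takeWhile PySem.Chars.isdigit)).getD 0
          + pvBGo (cs.dropWhile PySem.Chars.isdigit)
      else pvBGo cs
termination_by l => l.length
decreasing_by
  · exact Nat.lt_succ_of_le (List.length_dropWhile_le _ _)
  · simp

def sum_numeric_values_alt (input_text : String) : Int :=
  pvBGo input_text.toList

-- ===== PRECONDITION & SPEC =====
def Spec_sum_numeric_values (input_text : String) (out : Int) : Prop := out = sum_numeric_values_alt input_text
instance (input_text : String) (out : Int) : Decidable (Spec_sum_numeric_values input_text out) := by unfold Spec_sum_numeric_values; infer_instance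

-- ===== CLAIM (what is proved, stated in full; the proofs are below) =====
def Claim_equal_sum_numeric_values : Prop := ∀ (input_text : String), Dom_sum_numeric_values input_text → Spec_sum_numeric_values input_text (sum_numeric_values input_text)

-- ===== LEMMAS AND PROOFS =====

lemma pv_takeWhile_all {p : Char → Bool} (ds : List Char) (h : ∀ d ∈ ds, p d = true)
    (c : Char) (hc : p c = false) (cs : List Char) :
    (ds ++ c :: cs).takeWhile p = ds ∧ (ds ++ c :: cs).dropWhile p = c :: cs := by
  induction ds with
  | nil => simp [List.takeWhile, hc]
  | cons d ds ih =>
      have hd : p d = true := h d (by simp)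
      have := ih (fun x hx => h x (by simp [hx]))
      simp [List.takeWhile, hd, this.1, this.2]

lemma pvBGo_skip (c : Char) (hc : PySem.Chars.isdigit c = false) (cs : List Char) :
    pvBGo (c :: cs) = pvBGo cs := by
  simp [pvBGo, hc]

lemma pv_key : ∀ (cs cur : List Char) (total : Int),
    (∀ d ∈ cur, PySem.Chars.isdigit d = true) →
    pvALoop cs total cur = total + pvBGo (cur ++ cs) := by
  intro cs
  induction cs with
  | nil =>
      intro cur total h
      cases cur with
      | nil => simp [pvALoop, pvBGo]
      | cons d ds =>
          have hd : PySem.Chars.isdigit d = true := h d (by simp)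
          have htw : ds.takeWhile PySem.Chars.isdigit = ds := by
            rw [List.takeWhile_eq_self_iff]; exact fun x hx => h x (by simp [hx])
          have hdw : ds.dropWhile PySem.Chars.isdigit = [] := by
            rw [List.dropWhile_eq_nil_iff]; exact fun x hx => h x (by simp [hx])
          simp [pvALoop, pvBGo, hd, htw, hdw, pvAInt]
  | cons c cs ih =>
      intro cur total h
      by_cases hc : PySem.Chars.isdigit c = true
      · have hstep : pvALoop (c :: cs) total cur = pvALoop cs total (cur ++ [c]) := by
          simp [pvALoop, hc]
        rw [hstep, ih (cur ++ [c]) total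
              (by intro d hd; rcases List.mem_append.1 hd with h1 | h1
                  · exact h d h1
                  · simp at h1; subst h1; exact hc)]
        simp
      · have hc' : PySem.Chars.isdigit c = false := by simpa using hc
        cases cur with
        | nil =>
            have : pvALoop (c :: cs) total [] = pvALoop cs total [] := by
              simp [pvALoop, hc']
            rw [this, ih [] total (by simp)]
            simp [pvBGo_skip c hc' cs]
        | cons d ds =>
            have hd : PySem.Chars.isdigit d = true := h d (by simp)
            have hstep : pvALoop (c :: cs) total (d :: ds) =
                pvALoop cs (total + pvAInt (d :: ds)) [] := by
              simp [pvALoop, hc']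
            have hds : ∀ x ∈ ds, PySem.Chars.isdigit x = true :=
              fun x hx => h x (by simp [hx])
            obtain ⟨htw, hdw⟩ := pv_takeWhile_all ds hds c hc' cs
            rw [hstep, ih [] _ (by simp)]
            have : pvBGo ((d :: ds) ++ c :: cs) = pvAInt (d :: ds) + pvBGo cs := by
              simp only [List.cons_append, pvBGo, hd, if_pos, htw, hdw,
                pvBGo_skip c hc' cs, pvAInt]
            rw [this]; ring_nf; simp [add_comm, add_left_comm]

-- ===== VERDICT (by name: the statement is the Claim_ definition above) =====
theorem sum_numeric_values_spec : Claim_equal_sum_numeric_values := by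
  intro s _
  unfold Spec_sum_numeric_values sum_numeric_values sum_numeric_values_alt
  rw [pv_key s.toList [] 0 (by simp)]
  simp
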